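-- pv_equiv track=rewrite | github.com/scijava/jgo | src/jgo/cli/args.py | parse_remaining
-- ===== SOURCE A (Python) =====
-- def parse_remaining(remaining):
--     """
--     Parse remaining args for JVM and app arguments.
--
--     Format: [-- JVM_ARGS] [-- APP_ARGS]
--
--     Returns:
--         Tuple of (jvm_args, app_args)
--     """
--     if not remaining:
--         return [], []
--
--     # Convert to list
--     remaining = list(remaining)
--
--     # Find -- separators
--     separators = [i for i, arg in enumerate(remaining) if arg == "--"]
--
--     if not separators:
--         # No separators - everything is app args
--         return [], remaining
--
--     if len(separators) == 1:
--         # One separator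
--         sep_idx = separators[0]
--         jvm_args = remaining[:sep_idx]
--         app_args = remaining[sep_idx + 1 :]
--         return jvm_args, app_args
--
--     # Two or more separators
--     first_sep = separators[0]
--     second_sep = separators[1]
--     jvm_args = remaining[:first_sep]
--     app_args = remaining[second_sep + 1 :]
--     return jvm_args, app_args
-- ===== SOURCE B (Python) =====
-- def parse_remaining(remaining):
--     """Single pass state machine: route each arg into jvm/middle/app buckets
--     by a separator counter; no index table and no slicing."""
--     jvm, buf, app = [], [], []
--     seps = 0
--     for arg in remaining:
--         if arg == "--" and seps < 2:
--             seps += 1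
--         elif seps == 0:
--             jvm.append(arg)
--         elif seps == 1:
--             buf.append(arg)
--         else:
--             app.append(arg)
--     if seps == 0:
--         return [], jvm
--     if seps == 1:
--         return jvm, buf
--     return jvm, app
-- ===== Notes on version B (the rewrite author's own statement) =====
-- stated objective: alternative
-- what changed: Replaces A's precomputed separator-index table plus slicing with a single-pass state machine: a separator counter routes each argument into jvm/middle/app buckets, no indices or slices at all.
import Mathlib
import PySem

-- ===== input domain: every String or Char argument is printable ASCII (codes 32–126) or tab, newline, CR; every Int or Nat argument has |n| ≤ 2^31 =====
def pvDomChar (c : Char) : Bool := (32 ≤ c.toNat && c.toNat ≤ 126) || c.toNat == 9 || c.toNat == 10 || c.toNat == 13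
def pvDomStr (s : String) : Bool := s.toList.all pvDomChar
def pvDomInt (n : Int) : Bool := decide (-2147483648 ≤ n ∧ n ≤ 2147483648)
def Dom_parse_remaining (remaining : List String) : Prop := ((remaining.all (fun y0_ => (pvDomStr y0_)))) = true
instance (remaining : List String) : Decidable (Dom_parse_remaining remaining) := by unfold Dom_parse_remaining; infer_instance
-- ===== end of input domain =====

-- B replaces A's precomputed separator-index table and slicing with a single-pass
-- three-bucket state machine; objective: alternative (same asymptotic cost).

-- ===== PORT A =====
-- A's comprehension: [i for i, arg in enumerate(remaining) if arg == "--"]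
def sepList (xs : List String) (s : Int) : List Int :=
  ((PySem.List.enumerate xs s).filter (fun p => p.2 == "--")).map (fun p => p.1)

def parse_remaining (remaining : List String) : List String × List String :=
  if remaining.isEmpty then ([], [])
  else
    let separators := sepList remaining 0
    if separators.isEmpty then ([], remaining)
    else if separators.length == 1 then
      let sepIdx := separators.headD 0
      (PySem.List.slice remaining none (some sepIdx),
       PySem.List.slice remaining (some (sepIdx + 1)) none)
    else
      let firstSep := separators.headD 0
      let secondSep := (separators.drop 1).headD 0
      (PySem.List.slice remaining none (some firstSep),
       PySem.List.slice remaining (some (secondSep + 1)) none)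

-- ===== PORT B =====
-- loop body of Source B: route one argument into a bucket according to the separator count
def prStep (st : (List String × List String × List String) × Nat) (arg : String) :
    (List String × List String × List String) × Nat :=
  let ((jvm, buf, app), seps) := st
  if arg == "--" && seps < 2 then ((jvm, buf, app), seps + 1)
  else if seps = 0 then ((jvm ++ [arg], buf, app), seps)
  else if seps = 1 then ((jvm, buf ++ [arg], app), seps)
  else ((jvm, buf, app ++ [arg]), seps)

def parse_remaining_alt (remaining : List String) : List String × List String :=
  let ((jvm, buf, app), seps) := remaining.foldl prStep (([], [], []), 0)
  if seps = 0 then ([], jvm)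
  else if seps = 1 then (jvm, buf)
  else (jvm, app)

-- ===== PRECONDITION & SPEC =====
def Spec_parse_remaining (remaining : List String) (out : List String × List String) : Prop := out = parse_remaining_alt remaining
instance (remaining : List String) (out : List String × List String) : Decidable (Spec_parse_remaining remaining out) := by unfold Spec_parse_remaining; infer_instance

-- ===== CLAIM (what is proved, stated in full; the proofs are below) =====
def Claim_equal_parse_remaining : Prop := ∀ (remaining : List String), Dom_parse_remaining remaining → Spec_parse_remaining remaining (parse_remaining remaining)

-- ===== LEMMAS AND PROOFS =====

-- common characterisation of both programs, via first/second occurrence of "--"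
def prChar (xs : List String) : List String × List String :=
  match PySem.List.index? xs "--" with
  | none => ([], xs)
  | some k =>
    let jvm := xs.take k
    let rest := xs.drop (k + 1)
    match PySem.List.index? rest "--" with
    | none => (jvm, rest)
    | some j => (jvm, rest.drop (j + 1))

theorem sepList_nil (s : Int) : sepList [] s = [] := rfl

theorem sepList_cons (x : String) (xs : List String) (s : Int) :
    sepList (x :: xs) s = if x = "--" then s :: sepList xs (s + 1) else sepList xs (s + 1) := by
  simp only [sepList, PySem.List.enumerate_cons, List.filter_cons]
  split_ifs with h <;> simp_all

theorem sepList_eq_nil_iff (xs : List String) (s : Int) :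
    sepList xs s = [] ↔ "--" ∉ xs := by
  induction xs generalizing s with
  | nil => simp [sepList_nil]
  | cons x xs ih =>
    rw [sepList_cons]
    split_ifs with h
    · simp [h]
    · simpa [h, Ne.symm h] using ih (s + 1)

theorem sepList_of_index?_some (xs : List String) (s : Int) (k : Nat)
    (h : PySem.List.index? xs "--" = some k) :
    sepList xs s = (s + k) :: sepList (xs.drop (k + 1)) (s + k + 1) := by
  induction xs generalizing s k with
  | nil => simp [PySem.List.index?] at h
  | cons x xs ih =>
    by_cases hx : x = "--"
    · rw [hx] at h ⊢
      rw [PySem.List.index?_cons_self] at h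
      obtain rfl : k = 0 := by simpa using h.symm
      simp [sepList_cons]
    · rw [PySem.List.index?_cons_of_ne xs hx] at h
      obtain ⟨k', hk', rfl⟩ := Option.map_eq_some_iff.mp h
      rw [sepList_cons, if_neg hx, ih (s + 1) k' hk']
      simp
      constructor <;> ring_nf

theorem parse_remaining_eq_prChar (remaining : List String) :
    parse_remaining remaining = prChar remaining := by
  rcases h1 : PySem.List.index? remaining "--" with _ | k
  · have hnm : "--" ∉ remaining := (PySem.List.index?_eq_none_iff _ _).mp h1
    have hsep : sepList remaining 0 = [] := (sepList_eq_nil_iff _ _).mpr hnm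
    rcases remaining with _ | ⟨x, xs⟩
    · rfl
    · simp only [parse_remaining, prChar, h1, hsep]
      simp
  · have hne : remaining ≠ [] := by
      rintro rfl; simp [PySem.List.index?] at h1
    have hsep := sepList_of_index?_some remaining 0 k h1
    rw [zero_add] at hsep
    rcases h2 : PySem.List.index? (remaining.drop (k + 1)) "--" with _ | j
    · have hrest : sepList (remaining.drop (k + 1)) ((k : Int) + 1) = [] :=
        (sepList_eq_nil_iff _ _).mpr ((PySem.List.index?_eq_none_iff _ _).mp h2)
      rw [hrest] at hsep
      simp only [parse_remaining, prChar, h1, h2, hsep]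
      simp only [List.isEmpty_iff, hne, if_false, List.isEmpty_cons, List.length_cons,
        List.length_nil, List.headD_cons]
      norm_num
      have hc : (k : Int) + 1 = ((k + 1 : Nat) : Int) := by push_cast; ring
      rw [hc, PySem.List.slice_from_natCast]
    · have hrest := sepList_of_index?_some (remaining.drop (k + 1)) ((k : Int) + 1) j h2
      rw [hrest] at hsep
      simp only [parse_remaining, prChar, h1, h2, hsep]
      simp only [List.isEmpty_iff, hne, if_false, List.isEmpty_cons, List.length_cons,
        List.headD_cons, List.drop_succ_cons, List.drop_zero]
      norm_num
      have hc : (k : Int) + 1 + (j : Int) + 1 = ((k + 1 + (j + 1) : Nat) : Int) := by push_cast; ring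
      rw [hc, PySem.List.slice_from_natCast]

theorem foldl_prStep_two (xs : List String) (j b a : List String) :
    xs.foldl prStep ((j, b, a), 2) = ((j, b, a ++ xs), 2) := by
  induction xs generalizing a with
  | nil => simp
  | cons x xs ih =>
    simp only [List.foldl_cons, prStep]
    norm_num
    rw [ih]
    simp

theorem foldl_prStep_one (xs : List String) (j b a : List String) :
    xs.foldl prStep ((j, b, a), 1) =
      match PySem.List.index? xs "--" with
      | none => ((j, b ++ xs, a), 1)
      | some k => ((j, b ++ xs.take k, a ++ xs.drop (k + 1)), 2) := by
  induction xs generalizing b with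
  | nil => simp [PySem.List.index?]
  | cons x xs ih =>
    by_cases hx : x = "--"
    · subst hx
      simp only [List.foldl_cons, prStep, PySem.List.index?_cons_self]
      norm_num
      rw [foldl_prStep_two]
    · rw [PySem.List.index?_cons_of_ne xs hx]
      simp only [List.foldl_cons, prStep]
      rw [if_neg (by simp [hx])]
      norm_num
      rw [ih]
      rcases h : PySem.List.index? xs "--" with _ | k <;>
        simp only [PySem.List.index?_eq_idxOf?] at h <;> simp [h]

theorem foldl_prStep_zero (xs : List String) (j b a : List String) :
    xs.foldl prStep ((j, b, a), 0) =
      match PySem.List.index? xs "--" with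
      | none => ((j ++ xs, b, a), 0)
      | some k =>
        match PySem.List.index? (xs.drop (k + 1)) "--" with
        | none => ((j ++ xs.take k, b ++ xs.drop (k + 1), a), 1)
        | some i => ((j ++ xs.take k, b ++ (xs.drop (k + 1)).take i,
                      a ++ (xs.drop (k + 1)).drop (i + 1)), 2) := by
  induction xs generalizing j with
  | nil => simp [PySem.List.index?]
  | cons x xs ih =>
    by_cases hx : x = "--"
    · subst hx
      simp only [List.foldl_cons, prStep, PySem.List.index?_cons_self]
      norm_num
      rw [foldl_prStep_one]
      rcases h : PySem.List.index? xs "--" with _ | k <;>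
        simp only [PySem.List.index?_eq_idxOf?] at h <;> simp [h]
    · rw [PySem.List.index?_cons_of_ne xs hx]
      simp only [List.foldl_cons, prStep]
      rw [if_neg (by simp [hx])]
      norm_num
      rw [ih]
      rcases h : PySem.List.index? xs "--" with _ | k
      · simp only [PySem.List.index?_eq_idxOf?] at h
        simp [h]
      · rcases h2 : PySem.List.index? (xs.drop (k + 1)) "--" with _ | i <;>
          simp only [PySem.List.index?_eq_idxOf?] at h h2 <;>
          simp [h, h2, Nat.add_assoc]

theorem parse_remaining_alt_eq_prChar (remaining : List String) :
    parse_remaining_alt remaining = prChar remaining := by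
  simp only [parse_remaining_alt, foldl_prStep_zero, prChar]
  rcases h : PySem.List.index? remaining "--" with _ | k
  · simp only [PySem.List.index?_eq_idxOf?] at h
    simp
  · rcases h2 : PySem.List.index? (remaining.drop (k + 1)) "--" with _ | i <;>
      simp only [PySem.List.index?_eq_idxOf?] at h h2 <;> simp [h2]

-- ===== VERDICT (by name: the statement is the Claim_ definition above) =====
theorem parse_remaining_spec : Claim_equal_parse_remaining := by
  intro remaining _
  unfold Spec_parse_remaining
  rw [parse_remaining_eq_prChar, parse_remaining_alt_eq_prChar]
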